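-- pv_equiv track=rewrite | github.com/Daniel-Sottovia/INE5603 | Exercícios/lista12.py | diagonal_infer
-- ===== SOURCE A (Python) =====
-- def diagonal_infer(matriz):
--     tam = len(matriz)
--     diag = 1
--     final = []
--     while diag < tam:
--         l = diag
--         c = 0
--         temp = []
--         while l < tam:
--             temp.append(matriz[l][c])
--             c += 1
--             l += 1
--
--         diag += 1
--
--         if 0 in temp:
--             final.append(temp)
--
--     return final
-- ===== SOURCE B (Python) =====
-- def diagonal_infer(matriz):
--     tam = len(matriz)
--     diags = [[] for _ in range(tam)]
--     for l in range(tam):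
--         for c in range(l):
--             diags[l - c].append(matriz[l][c])
--     return [t for t in diags[1:] if 0 in t]
-- ===== Notes on version B (the rewrite author's own statement) =====
-- stated objective: faster
-- what changed: Replaces the per-diagonal re-walk (nested while loops restarting at each diagonal) by one row-major pass that buckets every lower-triangle element into a diagonal-indexed table, then a single filtering pass over the buckets.
import Mathlib
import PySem

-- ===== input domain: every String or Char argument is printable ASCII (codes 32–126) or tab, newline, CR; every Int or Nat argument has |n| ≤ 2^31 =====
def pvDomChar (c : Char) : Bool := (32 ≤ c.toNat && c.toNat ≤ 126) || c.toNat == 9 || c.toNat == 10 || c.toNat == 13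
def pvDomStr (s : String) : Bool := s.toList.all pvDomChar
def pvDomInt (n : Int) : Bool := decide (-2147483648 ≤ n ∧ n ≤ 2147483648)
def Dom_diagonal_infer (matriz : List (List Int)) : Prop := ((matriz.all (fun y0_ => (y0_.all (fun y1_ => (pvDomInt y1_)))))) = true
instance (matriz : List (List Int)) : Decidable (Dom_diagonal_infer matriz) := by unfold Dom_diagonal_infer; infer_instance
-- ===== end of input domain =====

-- B replaces A's per-diagonal re-walk (nested while loops restarting at each diagonal) by a
-- single row-major pass into a diagonal-indexed bucket table plus one filtering pass
-- (alternative decomposition, same asymptotic cost).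

-- ===== PORT A =====
-- the cell both Pythons read as matriz[l][c]; total via getD — Pre_ restricts to the
-- inputs where every access is in range (elsewhere Python raises IndexError)
def pvCell (m : List (List Int)) (l c : Nat) : Int := (m.getD l []).getD c 0

-- inner while: temp.append(matriz[l][c]); c += 1; l += 1 until l = tam
def pvTempA (matriz : List (List Int)) (tam l c : Nat) : List Int :=
  if l < tam then pvCell matriz l c :: pvTempA matriz tam (l + 1) (c + 1)
  else []
termination_by tam - l

-- outer while over diag, accumulating final
def pvOuterA (matriz : List (List Int)) (tam diag : Nat) (final : List (List Int)) :
    List (List Int) :=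
  if diag < tam then
    let temp := pvTempA matriz tam diag 0
    pvOuterA matriz tam (diag + 1) (if temp.contains 0 then final ++ [temp] else final)
  else final
termination_by tam - diag

def diagonal_infer (matriz : List (List Int)) : List (List Int) :=
  pvOuterA matriz matriz.length 1 []

-- ===== PORT B =====
def diagonal_infer_alt (matriz : List (List Int)) : List (List Int) :=
  let tam := matriz.length
  let init : List (List Int) := (List.range tam).map (fun _ => [])
  let diags := (List.range tam).foldl (fun b l =>
      (List.range l).foldl (fun b c =>
          b.set (l - c) ((b.getD (l - c) []) ++ [pvCell matriz l c])) b) init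
  (diags.drop 1).filter (fun t => t.contains 0)

-- ===== PRECONDITION & SPEC =====
-- Exactly the inputs on which Python A returns: row l (the accessed columns are 0..l-1)
-- has at least l entries for every l; otherwise A raises IndexError (so does B).
def Pre_diagonal_infer (matriz : List (List Int)) : Prop :=
  ∀ l ∈ List.range matriz.length, l ≤ (matriz.getD l []).length
instance (matriz : List (List Int)) : Decidable (Pre_diagonal_infer matriz) := by
  unfold Pre_diagonal_infer; infer_instance

def pvWitness_diagonal_infer : List (List Int) := [[1, 2], [0, 5]]

def Spec_diagonal_infer (matriz : List (List Int)) (out : List (List Int)) : Prop :=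
  out = diagonal_infer_alt matriz
instance (matriz : List (List Int)) (out : List (List Int)) :
    Decidable (Spec_diagonal_infer matriz out) := by unfold Spec_diagonal_infer; infer_instance

-- ===== CLAIM (what is proved, stated in full; the proofs are below) =====
def Claim_equal_diagonal_infer : Prop := ∀ (matriz : List (List Int)),
  Dom_diagonal_infer matriz → Pre_diagonal_infer matriz →
  Spec_diagonal_infer matriz (diagonal_infer matriz)

-- ===== LEMMAS AND PROOFS =====

-- buckets after the first L rows: diagonal d holds the cells (l, l-d) for d ≤ l < L
def pvSeg (m : List (List Int)) (L d : Nat) : List Int :=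
  if 1 ≤ d then (List.range' d (L - d)).map (fun l => pvCell m l (l - d)) else []

lemma pvSeg_zero (m : List (List Int)) (d : Nat) : pvSeg m 0 d = [] := by
  unfold pvSeg; split <;> simp

lemma pvSeg_succ (m : List (List Int)) (L d : Nat) :
    pvSeg m (L + 1) d =
      pvSeg m L d ++ (if 1 ≤ d ∧ d ≤ L then [pvCell m L (L - d)] else []) := by
  unfold pvSeg
  by_cases hd : 1 ≤ d
  · by_cases hL : d ≤ L
    · have h1 : L + 1 - d = (L - d) + 1 := by omega
      have h2 : d + (L - d) = L := by omega
      simp [hd, hL, h1, List.range'_concat, h2]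
    · have h1 : L + 1 - d = 0 := by omega
      have h2 : L - d = 0 := by omega
      simp [hd, hL, h1, h2]
  · simp [hd]

lemma pvTempA_eq (m : List (List Int)) (tam : Nat) :
    ∀ k l c, tam - l ≤ k →
      pvTempA m tam l c = (List.range (tam - l)).map (fun i => pvCell m (l + i) (c + i)) := by
  intro k
  induction k with
  | zero =>
    intro l c h
    have hl : ¬ l < tam := by omega
    have h0 : tam - l = 0 := by omega
    rw [pvTempA, if_neg hl, h0]
    simp
  | succ k ih =>
    intro l c h
    rw [pvTempA]
    by_cases hl : l < tam
    · have h1 : tam - l = (tam - (l + 1)) + 1 := by omega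
      rw [if_pos hl, ih (l+1) (c+1) (by omega), h1, List.range_succ_eq_map]
      simp only [List.map_cons, List.map_map, Nat.add_zero]
      congr 1
      apply List.map_congr_left
      intro i _
      simp only [Function.comp_apply]
      have e1 : l + 1 + i = l + (i + 1) := by omega
      have e2 : c + 1 + i = c + (i + 1) := by omega
      rw [e1, e2]
    · have h0 : tam - l = 0 := by omega
      rw [if_neg hl, h0]
      simp

lemma pvOuterA_eq (m : List (List Int)) (tam : Nat) :
    ∀ k diag final, tam - diag ≤ k →
      pvOuterA m tam diag final =
        final ++ ((List.range' diag (tam - diag)).map (fun d => pvTempA m tam d 0)).filter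
          (fun t => t.contains 0) := by
  intro k
  induction k with
  | zero =>
    intro diag final h
    have hd : ¬ diag < tam := by omega
    have h0 : tam - diag = 0 := by omega
    rw [pvOuterA, if_neg hd, h0]
    simp
  | succ k ih =>
    intro diag final h
    rw [pvOuterA]
    by_cases hd : diag < tam
    · have h1 : tam - diag = (tam - (diag + 1)) + 1 := by omega
      rw [if_pos hd, ih (diag+1) _ (by omega), h1, List.range'_succ]
      simp only [List.map_cons, List.filter_cons]
      by_cases hc : (0 : Int) ∈ pvTempA m tam diag 0
      · simp [hc]
      · simp [hc]
    · have h0 : tam - diag = 0 := by omega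
      rw [if_neg hd, h0]
      simp

lemma getD_map_range (g : Nat → List Int) {n i : Nat} (h : i < n) :
    ((List.range n).map g).getD i [] = g i := by
  simp [List.getD_eq_getElem?_getD, h]

lemma set_map_range (g : Nat → List Int) (n i : Nat) (v : List Int) :
    ((List.range n).map g).set i v =
      (List.range n).map (fun d => if d = i then v else g d) := by
  apply List.ext_getElem
  · simp
  · intro j h1 h2
    simp only [List.getElem_set, List.getElem_map, List.getElem_range]
    by_cases hij : i = j
    · subst hij
      simp
    · rw [if_neg hij, if_neg (fun hji => hij hji.symm)]

lemma inner_row (m : List (List Int)) (tam l : Nat) (hl : l < tam) (f : Nat → List Int) :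
    ∀ k, k ≤ l →
      (List.range k).foldl (fun b c => b.set (l - c) ((b.getD (l - c) []) ++ [pvCell m l c]))
          ((List.range tam).map f) =
        (List.range tam).map
          (fun d => if l - k < d ∧ d ≤ l then f d ++ [pvCell m l (l - d)] else f d) := by
  intro k
  induction k with
  | zero =>
    intro _
    simp only [List.range_zero, List.foldl_nil]
    apply List.map_congr_left
    intro d _
    have hno : ¬ (l - 0 < d ∧ d ≤ l) := by omega
    rw [if_neg hno]
  | succ k ih =>
    intro hk
    rw [List.range_succ, List.foldl_append, ih (by omega)]
    simp only [List.foldl_cons, List.foldl_nil]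
    have hik : l - k < tam := by omega
    rw [getD_map_range _ hik, set_map_range]
    have hcond : ¬ (l - k < l - k ∧ l - k ≤ l) := by omega
    rw [if_neg hcond]
    apply List.map_congr_left
    intro d _
    by_cases hdi : d = l - k
    · subst hdi
      have h3 : l - (l - k) = k := by omega
      have h4 : l - (k + 1) < l - k := by omega
      have h5 : l - k ≤ l := by omega
      simp [h3, h4, h5]
    · have hiff : (l - (k+1) < d ∧ d ≤ l) ↔ (l - k < d ∧ d ≤ l) := by omega
      rw [if_neg hdi]
      by_cases hc : l - k < d ∧ d ≤ l
      · rw [if_pos hc, if_pos (hiff.mpr hc)]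
      · rw [if_neg hc, if_neg (fun h => hc (hiff.mp h))]

lemma outer_fold (m : List (List Int)) (tam : Nat) :
    ∀ L, L ≤ tam →
      (List.range L).foldl (fun b l =>
          (List.range l).foldl (fun b c =>
              b.set (l - c) ((b.getD (l - c) []) ++ [pvCell m l c])) b)
        ((List.range tam).map (fun _ => ([] : List Int))) =
        (List.range tam).map (pvSeg m L) := by
  intro L
  induction L with
  | zero =>
    intro _
    simp only [List.range_zero, List.foldl_nil]
    apply List.map_congr_left
    intro d _
    simp [pvSeg_zero]
  | succ L ih =>
    intro hL
    rw [List.range_succ, List.foldl_append, ih (by omega)]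
    simp only [List.foldl_cons, List.foldl_nil]
    rw [inner_row m tam L (by omega) _ L (le_refl _)]
    apply List.map_congr_left
    intro d _
    rw [pvSeg_succ]
    by_cases hc : 1 ≤ d ∧ d ≤ L
    · rw [if_pos (show L - L < d ∧ d ≤ L by omega), if_pos hc]
    · rw [if_neg (show ¬ (L - L < d ∧ d ≤ L) by omega), if_neg hc, List.append_nil]

lemma drop_one_map_range (g : Nat → List Int) (n : Nat) :
    ((List.range n).map g).drop 1 = (List.range' 1 (n - 1)).map g := by
  cases n with
  | zero => simp
  | succ n =>
    rw [← List.map_drop]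
    congr 1
    rw [List.range_eq_range', List.range'_succ]
    simp

lemma seg_eq_temp (m : List (List Int)) (tam d : Nat) (hd : 1 ≤ d) :
    pvSeg m tam d = pvTempA m tam d 0 := by
  rw [pvTempA_eq m tam (tam - d) d 0 (le_refl _)]
  unfold pvSeg
  rw [if_pos hd, List.range'_eq_map_range]
  rw [List.map_map]
  apply List.map_congr_left
  intro i _
  simp only [Function.comp]
  congr 1
  omega

lemma ports_agree (matriz : List (List Int)) :
    diagonal_infer matriz = diagonal_infer_alt matriz := by
  have halt : diagonal_infer_alt matriz =
      ((((List.range matriz.length).foldl (fun b l =>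
          (List.range l).foldl (fun b c =>
              b.set (l - c) ((b.getD (l - c) []) ++ [pvCell matriz l c])) b)
        ((List.range matriz.length).map (fun _ => ([] : List Int)))).drop 1).filter
          (fun t => t.contains 0)) := rfl
  have ha : diagonal_infer matriz = pvOuterA matriz matriz.length 1 [] := rfl
  rw [ha, halt, pvOuterA_eq matriz matriz.length matriz.length 1 [] (by omega),
      outer_fold matriz matriz.length matriz.length (le_refl _),
      drop_one_map_range]
  rw [List.nil_append]
  congr 1
  apply List.map_congr_left
  intro d hd
  have h1 : 1 ≤ d := by
    have := List.mem_range'.mp hd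
    omega
  exact (seg_eq_temp matriz matriz.length d h1).symm

-- ===== VERDICT (by name: the statement is the Claim_ definition above) =====
theorem diagonal_infer_spec : Claim_equal_diagonal_infer := by
  intro matriz _ _
  unfold Spec_diagonal_infer
  exact ports_agree matriz
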